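-- pv_equiv track=rewrite | github.com/AST-LW/Cryptographic-Methods | columnarTransposition.py | changeKeyFormat
-- ===== SOURCE A (Python) =====
-- def changeKeyFormat(key):
--     lookUp={}
--     changedFormat=[]
--     for i,j in zip(sorted([i for i in key]),range(len(key))):
--         lookUp[i]=j
--     for i in key:
--         changedFormat.append(lookUp[i])
--     return changedFormat
-- ===== SOURCE B (Python) =====
-- def changeKeyFormat(key):
--     rank = {x: sum(1 for c in key if c <= x) - 1 for x in set(key)}
--     return [rank[x] for x in key]
-- ===== Notes on version B (the rewrite author's own statement) =====
-- stated objective: simpler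
-- what changed: Replaces sort-then-zip-rank-dict by a direct counting formula: each character's rank is (number of key characters <= it) - 1, computed once per distinct character; this reproduces the dict-overwrite last-sorted-index for duplicates without sorting.
import Mathlib
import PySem

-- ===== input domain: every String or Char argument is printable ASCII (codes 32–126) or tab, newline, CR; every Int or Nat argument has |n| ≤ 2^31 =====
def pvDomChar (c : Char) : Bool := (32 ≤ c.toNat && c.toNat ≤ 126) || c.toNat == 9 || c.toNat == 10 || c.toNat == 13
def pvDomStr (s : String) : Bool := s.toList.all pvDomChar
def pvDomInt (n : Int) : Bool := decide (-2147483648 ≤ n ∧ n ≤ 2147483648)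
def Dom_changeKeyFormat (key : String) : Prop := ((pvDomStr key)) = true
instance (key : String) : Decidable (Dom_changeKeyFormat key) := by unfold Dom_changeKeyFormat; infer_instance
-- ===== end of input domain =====

-- B replaces A's sort + zip + rank dict by the counting formula (count of key chars <= x) - 1, computed once per distinct char: no sort.

-- ===== PORT A =====
def changeKeyFormat (key : String) : List Int :=
  let lookUp : PySem.Dict Char Int :=
    ((PySem.List.sorted (key.toList.map (fun i => i)) (fun x => x) false).zip
      (PySem.List.pyRange 0 (PySem.Str.len key) 1)).foldl
      (fun d p => d.insert p.1 p.2) PySem.Dict.empty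
  -- lookUp[i]: every i of key is a key of lookUp (zip covers all of sorted(key)), so KeyError is unreachable; getD 0 is exact there
  key.toList.foldl (fun acc i => acc ++ [lookUp.getD i 0]) []

-- ===== PORT B =====
def changeKeyFormat_alt (key : String) : List Int :=
  let rank : PySem.Dict Char Int :=
    (PySem.Set.ofList key.toList).foldl
      (fun d x => d.insert x ((key.toList.countP (fun c => decide (c ≤ x)) : Int) - 1))
      PySem.Dict.empty
  -- rank[x]: every x of key is in set(key) hence a key of rank, so KeyError is unreachable; getD 0 is exact there
  key.toList.map (fun x => rank.getD x 0)

-- ===== PRECONDITION & SPEC =====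
def Spec_changeKeyFormat (key : String) (out : List Int) : Prop := out = changeKeyFormat_alt key
instance (key : String) (out : List Int) : Decidable (Spec_changeKeyFormat key out) := by unfold Spec_changeKeyFormat; infer_instance

-- ===== CLAIM (what is proved, stated in full; the proofs are below) =====
def Claim_equal_changeKeyFormat : Prop := ∀ (key : String), Dom_changeKeyFormat key → Spec_changeKeyFormat key (changeKeyFormat key)

-- ===== LEMMAS AND PROOFS =====

-- 'for i in key: out.append(f i)' is map
lemma foldl_append_map {α β : Type} (l : List α) (f : α → β) (acc : List β) :
    l.foldl (fun acc i => acc ++ [f i]) acc = acc ++ l.map f := by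
  induction l generalizing acc with
  | nil => simp
  | cons a t ih => simp [List.foldl, ih]

-- lookup after an insert loop = last matching pair, else the initial dict
lemma get?_foldl_insert {κ ν : Type} [BEq κ] [LawfulBEq κ]
    (l : List (κ × ν)) (d : PySem.Dict κ ν) (x : κ) :
    (l.foldl (fun d p => d.insert p.1 p.2) d).get? x =
      match l.reverse.find? (fun p => p.1 == x) with
      | some p => some p.2
      | none => d.get? x := by
  induction l generalizing d with
  | nil => simp
  | cons p t ih =>
    rw [List.foldl_cons, ih, List.reverse_cons, List.find?_append]
    cases h : t.reverse.find? (fun p => p.1 == x) with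
    | some q => simp
    | none =>
      by_cases hx : p.1 = x
      · subst hx; simp [List.find?, PySem.Dict.get?_insert_self]
      · simp [List.find?, beq_false_of_ne hx, PySem.Dict.get?_insert_of_ne _ _ (Ne.symm hx)]

-- in a sorted list, the last (char, index) pair with char = x carries index (count of ≤ x) - 1
lemma find_last_sorted (s : List Char) (hs : s.Pairwise (· ≤ ·)) (x : Char) (hx : x ∈ s) :
    ((s.zip ((List.range s.length).map (Int.ofNat))).reverse.find? (fun p => p.1 == x))
      = some (x, (s.countP (fun c => decide (c ≤ x)) : Int) - 1) := by
  induction s using List.reverseRecOn with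
  | nil => simp at hx
  | append_singleton t a ih =>
    have hlen : t.length = ((List.range t.length).map (Int.ofNat)).length := by simp
    have hall : ∀ y ∈ t, y ≤ a := by
      have := (List.pairwise_append.mp hs).2.2
      intro y hy; exact this y hy a (by simp)
    have hpt : t.Pairwise (· ≤ ·) := (List.pairwise_append.mp hs).1
    rw [show (t ++ [a]).length = t.length + 1 by simp, List.range_succ, List.map_append,
        List.zip_append hlen, List.reverse_append]
    simp only [List.map_cons, List.map_nil, List.zip_cons_cons, List.zip_nil_right,
      List.reverse_cons, List.reverse_nil, List.nil_append, List.cons_append,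
      List.find?]
    by_cases hax : a = x
    · subst hax
      simp only [beq_self_eq_true, List.countP_append]
      have hct : t.countP (fun c => decide (c ≤ a)) = t.length :=
        List.countP_eq_length.mpr (fun y hy => decide_eq_true (hall y hy))
      simp [hct]
    · have hxt : x ∈ t := by
        rcases List.mem_append.mp hx with h | h
        · exact h
        · simp at h; exact absurd h.symm hax
      have hnax : ¬ (a ≤ x) := fun hle => hax (le_antisymm hle (hall x hxt))
      have : (a == x) = false := beq_false_of_ne hax
      rw [this]
      simp only [List.countP_append, List.countP_cons, List.countP_nil,
        decide_eq_true_eq]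
      rw [if_neg hnax]
      simpa using ih hpt hxt

-- a fold of inserts at keys other than x leaves the lookup at x unchanged
lemma get?_foldl_insert_not_mem {κ ν : Type} [BEq κ] [LawfulBEq κ]
    (l : List κ) (f : κ → ν) (d : PySem.Dict κ ν) (x : κ) (hx : x ∉ l) :
    (l.foldl (fun d y => d.insert y (f y)) d).get? x = d.get? x := by
  induction l generalizing d with
  | nil => rfl
  | cons a t ih =>
    have hxt : x ∉ t := fun h => hx (List.mem_cons_of_mem a h)
    have hxa : x ≠ a := fun h => hx (by simp [h])
    rw [List.foldl_cons, ih _ hxt, PySem.Dict.get?_insert_of_ne _ _ hxa]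

-- a fold inserting f y at each y of l maps x ∈ l to f x
lemma getD_foldl_insert_fun {κ ν : Type} [BEq κ] [LawfulBEq κ]
    (l : List κ) (f : κ → ν) (d : PySem.Dict κ ν) (x : κ) (v0 : ν) (hx : x ∈ l) :
    (l.foldl (fun d y => d.insert y (f y)) d).getD x v0 = f x := by
  induction l generalizing d with
  | nil => simp at hx
  | cons a t ih =>
    rw [List.foldl_cons]
    by_cases hxt : x ∈ t
    · exact ih _ hxt
    · have hxa : x = a := by rcases List.mem_cons.mp hx with h | h; exact h; exact absurd h hxt
      subst hxa
      rw [PySem.Dict.getD_eq_get?_getD, get?_foldl_insert_not_mem _ _ _ _ hxt,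
        PySem.Dict.get?_insert_self]
      rfl

-- ===== VERDICT (by name: the statement is the Claim_ definition above) =====
theorem changeKeyFormat_spec : Claim_equal_changeKeyFormat := by
  intro key _
  unfold Spec_changeKeyFormat
  have hB : changeKeyFormat_alt key
      = key.toList.map (fun x => (key.toList.countP (fun c => decide (c ≤ x)) : Int) - 1) := by
    unfold changeKeyFormat_alt
    exact List.map_congr_left
      (fun x hx => getD_foldl_insert_fun _ _ _ _ _ ((PySem.Set.mem_ofList _ _).mpr hx))
  rw [hB]
  unfold changeKeyFormat
  simp only [List.map_id']
  set s := PySem.List.sorted key.toList (fun x => x) false with hsdef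
  have hperm : s.Perm key.toList := PySem.List.sorted_perm _ _ _
  have hlen : PySem.Str.len key = (s.length : Int) := by
    rw [PySem.Str.len_eq, hperm.length_eq]
  rw [hlen, foldl_append_map, List.nil_append]
  apply List.map_congr_left
  intro x hx
  have hxs : x ∈ s := hperm.mem_iff.mpr hx
  rw [PySem.Dict.getD_eq_get?_getD, get?_foldl_insert]
  rw [show PySem.List.pyRange 0 (s.length : Int) 1 = (List.range s.length).map (Int.ofNat)
        from ?_]
  · rw [find_last_sorted s (PySem.List.sorted_pairwise _ _) x hxs]
    simp [hperm.countP_eq]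
  · rw [PySem.List.pyRange_one]
    simp
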